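-- pv_equiv track=rewrite | github.com/neuron7x/Agent-X-Lab | tools/ci/ci_contract.py | calculate_required
-- ===== SOURCE A (Python) =====
-- from typing import Dict, List
--
-- def calculate_required(paths: List[str]) -> Dict[str, str]:
--     if paths and all(p.startswith("docs/") or p.startswith("build_proof/") or p.endswith(".md") for p in paths):
--         return {}
--
--     required: dict[str, str] = {}
--
--     def add(workflow: str, reason: str) -> None:
--         required[workflow] = reason
--
--     def any_path(predicate) -> bool:
--         return any(predicate(path) for path in paths)
--
--     if any_path(lambda p: p.startswith(".github/")):
--         add("workflow-hygiene.yml", "workflow_changes")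
--         add("action-pin-audit.yml", "workflow_changes")
--
--     if any_path(lambda p: p.startswith("engine/")):
--         add("engine-drift-guard.yml", "engine_changes")
--         add("python-verify.yml", "engine_changes")
--
--     ui_config_suffixes = (
--         "config.ts",
--         "config.js",
--         "vite.config.ts",
--         "playwright.config.ts",
--         "tsconfig.json",
--         "package.json",
--         "package-lock.json",
--     )
--     if any_path(
--         lambda p: p.startswith(("src/", "workers/", "e2e/", "scripts/"))
--         or p.endswith(ui_config_suffixes)
--     ):
--         add("ui-verify.yml", "ui_changes")
--
--     if any_path(lambda p: p.startswith("e2e/") or "playwright" in p.lower()):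
--         add("ui-e2e.yml", "ui_e2e_relevant")
--
--     if any_path(lambda p: p.startswith(("src/", "workers/"))):
--         add("ui-perf.yml", "ui_perf_relevant")
--
--     return dict(sorted(required.items(), key=lambda item: item[0]))
-- ===== SOURCE B (Python) =====
-- def calculate_required(paths):
--     ui_config_suffixes = (
--         "config.ts", "config.js", "vite.config.ts", "playwright.config.ts",
--         "tsconfig.json", "package.json", "package-lock.json",
--     )
--     github = engine = ui = e2e = perf = False
--     all_docs = True
--     for p in paths:
--         all_docs = all_docs and (
--             p.startswith("docs/") or p.startswith("build_proof/") or p.endswith(".md")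
--         )
--         if p.startswith(".github/"):
--             github = True
--         if p.startswith("engine/"):
--             engine = True
--         if p.startswith(("src/", "workers/", "e2e/", "scripts/")) or p.endswith(ui_config_suffixes):
--             ui = True
--         if p.startswith("e2e/") or "playwright" in p.lower():
--             e2e = True
--         if p.startswith(("src/", "workers/")):
--             perf = True
--     if paths and all_docs:
--         return {}
--     result = {}
--     if github:
--         result["action-pin-audit.yml"] = "workflow_changes"
--     if engine:
--         result["engine-drift-guard.yml"] = "engine_changes"
--         result["python-verify.yml"] = "engine_changes"
--     if e2e:
--         result["ui-e2e.yml"] = "ui_e2e_relevant"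
--     if perf:
--         result["ui-perf.yml"] = "ui_perf_relevant"
--     if ui:
--         result["ui-verify.yml"] = "ui_changes"
--     if github:
--         result["workflow-hygiene.yml"] = "workflow_changes"
--     return result
-- ===== Notes on version B (the rewrite author's own statement) =====
-- stated objective: alternative
-- what changed: Six separate any/all scans over paths are replaced by one loop accumulating boolean flags, and the sort call is replaced by emitting the workflow entries directly in already-sorted key order.
import Mathlib
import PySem

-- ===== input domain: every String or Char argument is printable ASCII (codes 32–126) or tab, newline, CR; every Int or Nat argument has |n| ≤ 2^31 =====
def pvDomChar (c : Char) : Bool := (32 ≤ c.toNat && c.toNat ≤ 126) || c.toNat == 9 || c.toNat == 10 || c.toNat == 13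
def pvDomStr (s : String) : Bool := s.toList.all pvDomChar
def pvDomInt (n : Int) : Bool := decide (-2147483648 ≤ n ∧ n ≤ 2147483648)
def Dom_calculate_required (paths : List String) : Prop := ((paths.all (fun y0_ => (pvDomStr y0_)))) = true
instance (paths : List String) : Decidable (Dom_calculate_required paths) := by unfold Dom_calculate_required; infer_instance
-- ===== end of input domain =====

-- B replaces A's six any/all scans over paths by one flag-accumulating pass and builds the
-- result directly in sorted key order instead of sorting; alternative decomposition, return value only.

-- shared path predicates (the same literal lambdas both Pythons contain)
def pDocs (p : String) : Bool :=
  PySem.Str.startswith p "docs/" || PySem.Str.startswith p "build_proof/" || PySem.Str.endswith p ".md"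
def pGithub (p : String) : Bool := PySem.Str.startswith p ".github/"
def pEngine (p : String) : Bool := PySem.Str.startswith p "engine/"
def pUi (p : String) : Bool :=
  PySem.Str.startswith p "src/" || PySem.Str.startswith p "workers/" ||
  PySem.Str.startswith p "e2e/" || PySem.Str.startswith p "scripts/" ||
  PySem.Str.endswith p "config.ts" || PySem.Str.endswith p "config.js" ||
  PySem.Str.endswith p "vite.config.ts" || PySem.Str.endswith p "playwright.config.ts" ||
  PySem.Str.endswith p "tsconfig.json" || PySem.Str.endswith p "package.json" ||
  PySem.Str.endswith p "package-lock.json"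
def pE2e (p : String) : Bool :=
  PySem.Str.startswith p "e2e/" || PySem.Str.isIn "playwright" (PySem.Str.lower p)
def pPerf (p : String) : Bool :=
  PySem.Str.startswith p "src/" || PySem.Str.startswith p "workers/"

-- ===== PORT A =====
def calculate_required (paths : List String) : List (String × String) :=
  if paths ≠ [] ∧ paths.all pDocs = true then []
  else
    let required : PySem.Dict String String := PySem.Dict.empty
    let required :=
      if paths.any pGithub then
        (required.insert "workflow-hygiene.yml" "workflow_changes").insert
          "action-pin-audit.yml" "workflow_changes"
      else required
    let required :=
      if paths.any pEngine then
        (required.insert "engine-drift-guard.yml" "engine_changes").insert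
          "python-verify.yml" "engine_changes"
      else required
    let required :=
      if paths.any pUi then required.insert "ui-verify.yml" "ui_changes" else required
    let required :=
      if paths.any pE2e then required.insert "ui-e2e.yml" "ui_e2e_relevant" else required
    let required :=
      if paths.any pPerf then required.insert "ui-perf.yml" "ui_perf_relevant" else required
    -- sort key item[0]: Python string comparison is code-point lexicographic = List Char order (exact)
    (PySem.Dict.ofList (PySem.List.sorted required.items (fun item => item.1.toList))).items

-- ===== PORT B =====
-- single pass accumulating (all_docs, github, engine, ui, e2e, perf)
def altStep (s : Bool × Bool × Bool × Bool × Bool × Bool) (p : String) :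
    Bool × Bool × Bool × Bool × Bool × Bool :=
  (s.1 && pDocs p, s.2.1 || pGithub p, s.2.2.1 || pEngine p,
   s.2.2.2.1 || pUi p, s.2.2.2.2.1 || pE2e p, s.2.2.2.2.2 || pPerf p)

def calculate_required_alt (paths : List String) : List (String × String) :=
  let s := paths.foldl altStep (true, false, false, false, false, false)
  if paths ≠ [] ∧ s.1 = true then []
  else
    let result : PySem.Dict String String := PySem.Dict.empty
    let result := if s.2.1 then result.insert "action-pin-audit.yml" "workflow_changes" else result
    let result :=
      if s.2.2.1 then
        (result.insert "engine-drift-guard.yml" "engine_changes").insert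
          "python-verify.yml" "engine_changes"
      else result
    let result := if s.2.2.2.2.1 then result.insert "ui-e2e.yml" "ui_e2e_relevant" else result
    let result := if s.2.2.2.2.2 then result.insert "ui-perf.yml" "ui_perf_relevant" else result
    let result := if s.2.2.2.1 then result.insert "ui-verify.yml" "ui_changes" else result
    let result := if s.2.1 then result.insert "workflow-hygiene.yml" "workflow_changes" else result
    result.items

-- ===== PRECONDITION & SPEC =====
def Spec_calculate_required (paths : List String) (out : List (String × String)) : Prop := out = calculate_required_alt paths
instance (paths : List String) (out : List (String × String)) : Decidable (Spec_calculate_required paths out) := by unfold Spec_calculate_required; infer_instance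

-- ===== CLAIM (what is proved, stated in full; the proofs are below) =====
def Claim_equal_calculate_required : Prop := ∀ (paths : List String), Dom_calculate_required paths → Spec_calculate_required paths (calculate_required paths)

-- ===== LEMMAS AND PROOFS =====

-- the fold's state is exactly the all/any scans A performs
theorem altStep_foldl (paths : List String) (s : Bool × Bool × Bool × Bool × Bool × Bool) :
    paths.foldl altStep s =
      (s.1 && paths.all pDocs, s.2.1 || paths.any pGithub, s.2.2.1 || paths.any pEngine,
       s.2.2.2.1 || paths.any pUi, s.2.2.2.2.1 || paths.any pE2e,
       s.2.2.2.2.2 || paths.any pPerf) := by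
  induction paths generalizing s with
  | nil => simp
  | cons p t ih =>
      simp only [List.foldl_cons, ih, altStep, List.all_cons, List.any_cons,
        Bool.and_assoc, Bool.or_assoc]

theorem calculate_required_spec' (paths : List String) :
    calculate_required paths = calculate_required_alt paths := by
  unfold calculate_required calculate_required_alt
  rw [altStep_foldl]
  simp only [Bool.true_and, Bool.false_or]
  by_cases hd : paths ≠ [] ∧ paths.all pDocs = true
  · simp [hd]
  · simp only [if_neg hd]
    cases hg : paths.any pGithub <;> cases he : paths.any pEngine <;>
      cases hu : paths.any pUi <;> cases h2 : paths.any pE2e <;>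
        cases hp : paths.any pPerf <;> decide

-- ===== VERDICT (by name: the statement is the Claim_ definition above) =====
theorem calculate_required_spec : Claim_equal_calculate_required := by
  intro paths _
  exact calculate_required_spec' paths
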